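-- pv_equiv track=rewrite | github.com/Kiran9206/DSA | DAS/Intermediate_DSA_Arrays_Carry_Forward_&_Subarrays/Special_Subsequences_AG_2.py | special_subsequence_optimised
-- ===== SOURCE A (Python) =====
-- def special_subsequence_optimised(A):
--     pair = count_a = 0
--     for item in A:
--         if item == 'A':
--             count_a+=1
--         if item == 'G':
--             pair+=count_a
--     return pair
-- ===== SOURCE B (Python) =====
-- def special_subsequence_optimised(A):
--     return sum(A[:i].count('A') for i in range(len(A)) if A[i] == 'G')
-- ===== Notes on version B (the rewrite author's own statement) =====
-- stated objective: alternative
-- what changed: Replaces the single carry-forward accumulator pass by the definition-following form: for each position holding 'G', count the 'A's in the prefix slice before it and sum those counts.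
import Mathlib
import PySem

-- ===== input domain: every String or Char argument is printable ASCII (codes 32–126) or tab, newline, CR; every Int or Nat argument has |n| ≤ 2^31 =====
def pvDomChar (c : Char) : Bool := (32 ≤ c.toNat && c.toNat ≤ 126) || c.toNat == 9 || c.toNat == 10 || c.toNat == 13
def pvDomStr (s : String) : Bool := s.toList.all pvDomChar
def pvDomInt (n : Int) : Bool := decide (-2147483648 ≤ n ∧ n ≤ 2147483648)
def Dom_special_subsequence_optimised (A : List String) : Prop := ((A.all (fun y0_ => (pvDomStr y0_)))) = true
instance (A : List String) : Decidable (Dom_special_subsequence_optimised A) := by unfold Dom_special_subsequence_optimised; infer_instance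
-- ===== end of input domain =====

-- B replaces A's carry-forward accumulator pass by the definition-following form:
-- sum, over each position holding "G", of the count of "A" in the prefix slice
-- before it (alternative decomposition, not faster).

-- ===== PORT A =====
-- loop body of A (update count_a, then pair), kept as a named helper
def stepAG (s : Int × Int) (item : String) : Int × Int :=
  let s1 := if item == "A" then (s.1, s.2 + 1) else s
  if item == "G" then (s1.1 + s1.2, s1.2) else s1

def special_subsequence_optimised (A : List String) : Int :=
  (A.foldl stepAG ((0 : Int), (0 : Int))).1

-- ===== PORT B =====
-- sum(A[:i].count('A') for i in range(len(A)) if A[i] == 'G');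
-- A[i] is always in range here, so pyGetD is exact.
def special_subsequence_optimised_alt (A : List String) : Int :=
  (PySem.List.pyRange 0 (A.length : Int) 1).foldl
    (fun acc i =>
      if PySem.List.pyGetD A i "" == "G" then
        acc + (PySem.List.count (PySem.List.slice A none (some i)) "A" : Int)
      else acc) 0

-- ===== PRECONDITION & SPEC =====
def Spec_special_subsequence_optimised (A : List String) (out : Int) : Prop := out = special_subsequence_optimised_alt A
instance (A : List String) (out : Int) : Decidable (Spec_special_subsequence_optimised A out) := by unfold Spec_special_subsequence_optimised; infer_instance

-- ===== CLAIM (what is proved, stated in full; the proofs are below) =====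
def Claim_equal_special_subsequence_optimised : Prop := ∀ (A : List String), Dom_special_subsequence_optimised A → Spec_special_subsequence_optimised A (special_subsequence_optimised A)

-- ===== LEMMAS AND PROOFS =====

-- reference value: for each "A", the number of "G"s after it
def gAG : List String → Int
  | [] => 0
  | x :: xs => (if x == "A" then (xs.count "G" : Int) else 0) + gAG xs

lemma gAG_append_singleton (l : List String) (x : String) :
    gAG (l ++ [x]) = gAG l + (if x == "G" then (l.count "A" : Int) else 0) := by
  induction l with
  | nil => simp [gAG, List.count]
  | cons y l ih =>
    simp only [List.cons_append, gAG, ih, List.count_cons, List.count_append]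
    by_cases hy : y = "A" <;> by_cases hx : x = "G" <;>
      simp [hy, hx] <;> push_cast <;> ring

lemma portA_foldl (l : List String) (p c : Int) :
    (l.foldl stepAG (p, c))
      = (p + c * (l.count "G" : Int) + gAG l, c + (l.count "A" : Int)) := by
  induction l generalizing p c with
  | nil => simp [gAG]
  | cons x l ih =>
    rw [List.foldl_cons]
    by_cases hA : x = "A" <;> by_cases hG : x = "G"
    · rw [hA] at hG; simp at hG
    · rw [show stepAG (p, c) x = (p, c + 1) by simp [stepAG, hA, hG], ih, Prod.ext_iff]
      constructor <;> simp [gAG, hA, hG, List.count_cons] <;> push_cast <;> ring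
    · rw [show stepAG (p, c) x = (p + c, c) by simp [stepAG, hA, hG], ih, Prod.ext_iff]
      constructor <;> simp [gAG, hA, hG, List.count_cons] <;> push_cast <;> ring
    · rw [show stepAG (p, c) x = (p, c) by simp [stepAG, hA, hG], ih, Prod.ext_iff]
      constructor <;> simp [gAG, hA, hG, List.count_cons]

lemma altB_eq_gAG (A : List String) :
    special_subsequence_optimised_alt A = gAG A := by
  induction A using List.reverseRecOn with
  | nil => simp [special_subsequence_optimised_alt, gAG, PySem.List.pyRange_one_eq_nil]
  | append_singleton l x ih =>
    unfold special_subsequence_optimised_alt at *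
    have hlen : ((l ++ [x]).length : Int) = (l.length : Int) + 1 := by simp
    rw [hlen, PySem.List.pyRange_one_succ_right (by positivity), List.foldl_append,
        gAG_append_singleton]
    have hcongr :
        (PySem.List.pyRange 0 (l.length : Int) 1).foldl
          (fun acc i =>
            if PySem.List.pyGetD (l ++ [x]) i "" == "G" then
              acc + (PySem.List.count (PySem.List.slice (l ++ [x]) none (some i)) "A" : Int)
            else acc) 0
        = (PySem.List.pyRange 0 (l.length : Int) 1).foldl
          (fun acc i =>
            if PySem.List.pyGetD l i "" == "G" then
              acc + (PySem.List.count (PySem.List.slice l none (some i)) "A" : Int)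
            else acc) 0 := by
      apply PySem.List.foldl_congr_mem
      intro acc i hi
      rw [PySem.List.mem_pyRange_one] at hi
      obtain ⟨h0, hlt⟩ := hi
      have hi' : i = ((i.toNat : Nat) : Int) := by omega
      have hltn : i.toNat < l.length := by omega
      rw [hi', PySem.List.pyGetD_natCast, PySem.List.pyGetD_natCast,
          PySem.List.slice_to_natCast, PySem.List.slice_to_natCast]
      have htake : (l ++ [x]).take i.toNat = l.take i.toNat :=
        List.take_append_of_le_length (by omega)
      have hgetD : (l ++ [x]).getD i.toNat "" = l.getD i.toNat "" := by
        simp [List.getD, List.getElem?_append_left hltn]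
      rw [htake, hgetD]
    rw [hcongr, ih]
    simp only [List.foldl_cons, List.foldl_nil]
    rw [PySem.List.pyGetD_natCast, PySem.List.slice_to_natCast]
    have hx : (l ++ [x]).getD l.length "" = x := by
      simp [List.getD, List.getElem?_append_right (le_refl l.length)]
    rw [hx, List.take_left]
    simp [PySem.List.count_eq]
    split_ifs <;> simp

-- ===== VERDICT (by name: the statement is the Claim_ definition above) =====
theorem special_subsequence_optimised_spec : Claim_equal_special_subsequence_optimised := by
  intro A _
  unfold Spec_special_subsequence_optimised special_subsequence_optimised
  rw [altB_eq_gAG, portA_foldl]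
  simp
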